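-- pv_equiv track=rewrite | github.com/capopaper/capo | scripts/final_pipeline/analysis_logic.py | create_final_annotation_files
-- ===== SOURCE A (Python) =====
-- def create_final_annotation_files(merged_groups_by_doc, all_annotators):
--     all_concept_ids = []
--     for doc_id, groups in sorted(merged_groups_by_doc.items()):
--         for i in range(len(groups)):
--             all_concept_ids.append(f"concept{doc_id}_{i+1}")
--
--     human_annotators = sorted([ann_id for ann_id in all_annotators if ann_id != 'LLM'])
--     humans_annotations = {
--         f"annotator{ann_id}": {concept_id: [False] for concept_id in all_concept_ids}
--         for ann_id in human_annotators
--     }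
--     LLM_annotations = {concept_id: [False] for concept_id in all_concept_ids}
--
--     for doc_id, merged_groups in sorted(merged_groups_by_doc.items()):
--         for i, group in enumerate(merged_groups):
--             concept_id = f"concept{doc_id}_{i+1}"
--             for annotator_id, contribution in group['contributions'].items():
--                 if len(contribution) > 0:
--                     if annotator_id == 'LLM':
--                         if concept_id in LLM_annotations:
--                             LLM_annotations[concept_id] = [True]
--                     else:
--                         annotator_key = f"annotator{annotator_id}"
--                         if annotator_key in humans_annotations and concept_id in humans_annotations[annotator_key]:
--                             humans_annotations[annotator_key][concept_id] = [True]
--     return humans_annotations, LLM_annotations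
-- ===== SOURCE B (Python) =====
-- def create_final_annotation_files(merged_groups_by_doc, all_annotators):
--     items = sorted(merged_groups_by_doc.items())
--     all_concept_ids = [f"concept{doc_id}_{i+1}"
--                        for doc_id, groups in items
--                        for i in range(len(groups))]
--     # index pass: which (concept, annotator) pairs have a non-empty contribution
--     marks = {
--         (f"concept{doc_id}_{i+1}", annotator_id)
--         for doc_id, groups in items
--         for i, group in enumerate(groups)
--         for annotator_id, contribution in group['contributions'].items()
--         if len(contribution) > 0
--     }
--     human_annotators = sorted(a for a in all_annotators if a != 'LLM')
--     humans_annotations = {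
--         f"annotator{a}": {c: [(c, a) in marks] for c in all_concept_ids}
--         for a in human_annotators
--     }
--     LLM_annotations = {c: [(c, 'LLM') in marks] for c in all_concept_ids}
--     return humans_annotations, LLM_annotations
-- ===== Notes on version B (the rewrite author's own statement) =====
-- stated objective: alternative
-- what changed: B replaces A's initialize-all-False-then-mutate strategy by a single index pass that collects the set of (concept, annotator) pairs with a non-empty contribution, and then builds both annotation tables directly by membership lookup in that set.
import Mathlib
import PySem

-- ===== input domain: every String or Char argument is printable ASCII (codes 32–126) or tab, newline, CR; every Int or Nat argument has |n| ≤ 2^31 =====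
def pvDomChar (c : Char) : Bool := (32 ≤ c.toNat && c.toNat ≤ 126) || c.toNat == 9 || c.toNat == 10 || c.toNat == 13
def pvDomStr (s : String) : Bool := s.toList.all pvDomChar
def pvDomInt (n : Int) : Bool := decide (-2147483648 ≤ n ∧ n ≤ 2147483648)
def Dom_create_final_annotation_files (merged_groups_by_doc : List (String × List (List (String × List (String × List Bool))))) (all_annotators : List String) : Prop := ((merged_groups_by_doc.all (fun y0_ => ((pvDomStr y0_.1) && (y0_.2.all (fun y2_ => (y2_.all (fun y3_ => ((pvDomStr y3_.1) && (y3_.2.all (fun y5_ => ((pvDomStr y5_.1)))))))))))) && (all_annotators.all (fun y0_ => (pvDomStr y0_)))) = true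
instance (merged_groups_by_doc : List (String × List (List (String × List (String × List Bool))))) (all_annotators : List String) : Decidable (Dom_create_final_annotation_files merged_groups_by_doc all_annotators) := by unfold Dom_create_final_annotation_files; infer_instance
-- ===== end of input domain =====

-- B replaces A's initialise-all-False-then-mutate strategy by one index pass collecting the
-- (concept, annotator) pairs with a non-empty contribution into a set, from which both tables
-- are then built directly (objective: alternative decomposition, same asymptotic cost).

-- the f-string  f"concept{doc_id}_{i+1}"  (used verbatim by both Pythons)
def pvConcept (doc : String) (i : Int) : String :=
  "concept" ++ doc ++ "_" ++ PySem.Int.toStr (i + 1)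

-- ===== PORT A =====
-- Python sorts the dict's .items(); with the distinct keys guaranteed by Pre_, sorted(items)
-- is exactly the stable sort by key.  group['contributions'] is ported as getD with a dummy
-- default: Pre_ excludes the KeyError inputs where the key is absent.
def create_final_annotation_files (merged_groups_by_doc : List (String × List (List (String × List (String × List Bool))))) (all_annotators : List String) : (List (String × List (String × List Bool))) × (List (String × List Bool)) :=
  let sortedItems := PySem.List.sorted merged_groups_by_doc (fun p => p.1) false
  let all_concept_ids := sortedItems.foldl (fun acc dg =>
      (PySem.List.pyRange 0 (dg.2.length : Int) 1).foldl (fun acc2 i => acc2 ++ [pvConcept dg.1 i]) acc) []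
  let human_annotators := PySem.List.sorted (all_annotators.filter (fun a => !(a == "LLM"))) (fun x => x) false
  let humans0 : PySem.Dict String (PySem.Dict String (List Bool)) :=
    PySem.Dict.ofList (human_annotators.map (fun a =>
      ("annotator" ++ a, PySem.Dict.ofList (all_concept_ids.map (fun c => (c, [false]))))))
  let llm0 : PySem.Dict String (List Bool) := PySem.Dict.ofList (all_concept_ids.map (fun c => (c, [false])))
  let st := sortedItems.foldl (fun st1 dg =>
      (PySem.List.enumerate dg.2 0).foldl (fun st2 ig =>
        let cid := pvConcept dg.1 ig.1
        ((PySem.Dict.mk ig.2).getD "contributions" []).foldl (fun st3 av =>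
          if 0 < av.2.length then
            if av.1 == "LLM" then
              (if st3.2.contains cid then (st3.1, st3.2.insert cid [true]) else st3)
            else
              let key := "annotator" ++ av.1
              match st3.1.get? key with
              | some inner =>
                  if inner.contains cid then (st3.1.insert key (inner.insert cid [true]), st3.2) else st3
              | none => st3
          else st3) st2) st1) (humans0, llm0)
  (st.1.items.map (fun p => (p.1, p.2.items)), st.2.items)

-- ===== PORT B =====
def create_final_annotation_files_alt (merged_groups_by_doc : List (String × List (List (String × List (String × List Bool))))) (all_annotators : List String) : (List (String × List (String × List Bool))) × (List (String × List Bool)) :=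
  let items := PySem.List.sorted merged_groups_by_doc (fun p => p.1) false
  let all_concept_ids := items.flatMap (fun dg =>
      (PySem.List.pyRange 0 (dg.2.length : Int) 1).map (pvConcept dg.1))
  -- index pass: the set of (concept, annotator) pairs with a non-empty contribution
  let marks : PySem.Set (String × String) :=
    PySem.Set.ofList (items.flatMap (fun dg =>
      (PySem.List.enumerate dg.2 0).flatMap (fun ig =>
        (((PySem.Dict.mk ig.2).getD "contributions" []).filter (fun av => decide (0 < av.2.length))).map
          (fun av => (pvConcept dg.1 ig.1, av.1)))))
  let human_annotators := PySem.List.sorted (all_annotators.filter (fun a => !(a == "LLM"))) (fun x => x) false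
  let humans := PySem.Dict.ofList (human_annotators.map (fun a =>
      ("annotator" ++ a, PySem.Dict.ofList (all_concept_ids.map (fun c => (c, [PySem.Set.contains marks (c, a)]))))))
  let llm := PySem.Dict.ofList (all_concept_ids.map (fun c => (c, [PySem.Set.contains marks (c, "LLM")])))
  (humans.items.map (fun p => (p.1, p.2.items)), llm.items)

-- ===== PRECONDITION & SPEC =====
-- Pre_ excludes (i) association lists with duplicate keys at any of the three dict positions —
-- those do not represent Python dicts (a Python dict literal silently collapses them, so A
-- returns a value computed from the collapsed dict, which neither port sees), and (ii) groups
-- lacking the 'contributions' key, on which A raises KeyError.  The two PORTS happen to agree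
-- even outside Pre_ (the proof below does not need it); Pre_ delimits where the ports are
-- faithful to the Pythons.
def Pre_create_final_annotation_files (merged_groups_by_doc : List (String × List (List (String × List (String × List Bool))))) (all_annotators : List String) : Prop :=
  (merged_groups_by_doc.map Prod.fst).Nodup ∧
  ∀ p ∈ merged_groups_by_doc, ∀ g ∈ p.2,
    (g.map Prod.fst).Nodup ∧ "contributions" ∈ g.map Prod.fst ∧
    ∀ q ∈ g, (q.2.map Prod.fst).Nodup
instance (merged_groups_by_doc : List (String × List (List (String × List (String × List Bool))))) (all_annotators : List String) : Decidable (Pre_create_final_annotation_files merged_groups_by_doc all_annotators) := by unfold Pre_create_final_annotation_files; infer_instance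

def pvWitness_create_final_annotation_files : (List (String × List (List (String × List (String × List Bool))))) × List String :=
  ([("d1", [[("contributions", [("7", [true]), ("LLM", [])])], [("contributions", [("LLM", [true, false])])]])], ["7", "LLM", "9"])

def Spec_create_final_annotation_files (merged_groups_by_doc : List (String × List (List (String × List (String × List Bool))))) (all_annotators : List String) (out : (List (String × List (String × List Bool))) × (List (String × List Bool))) : Prop := out = create_final_annotation_files_alt merged_groups_by_doc all_annotators
instance (merged_groups_by_doc : List (String × List (List (String × List (String × List Bool))))) (all_annotators : List String) (out : (List (String × List (String × List Bool))) × (List (String × List Bool))) : Decidable (Spec_create_final_annotation_files merged_groups_by_doc all_annotators out) := by unfold Spec_create_final_annotation_files; infer_instance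

-- ===== CLAIM (what is proved, stated in full; the proofs are below) =====
def Claim_equal_create_final_annotation_files : Prop := ∀ (merged_groups_by_doc : List (String × List (List (String × List (String × List Bool))))) (all_annotators : List String), Dom_create_final_annotation_files merged_groups_by_doc all_annotators → Pre_create_final_annotation_files merged_groups_by_doc all_annotators → Spec_create_final_annotation_files merged_groups_by_doc all_annotators (create_final_annotation_files merged_groups_by_doc all_annotators)

-- ===== LEMMAS AND PROOFS =====

def pvTbl {ν : Type} (ks : List String) (v : String → ν) : PySem.Dict String ν :=
  PySem.Dict.ofList (ks.map (fun q => (q, v q)))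

theorem pvTbl_append {ν : Type} (ks : List String) (x : String) (v : String → ν) :
    pvTbl (ks ++ [x]) v = (pvTbl ks v).insert x (v x) := by
  simp [pvTbl, PySem.Dict.ofList, PySem.Dict.update, List.foldl_append]

theorem pvTbl_congr {ν : Type} (ks : List String) (v w : String → ν)
    (h : ∀ q ∈ ks, v q = w q) : pvTbl ks v = pvTbl ks w := by
  unfold pvTbl; exact congrArg _ (List.map_congr_left (fun a ha => by rw [h a ha]))

theorem pvItems_tbl {ν : Type} (ks : List String) (v : String → ν) :
    (pvTbl ks v).items = (PySem.Set.ofList ks).map (fun q => (q, v q)) := by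
  induction ks using List.reverseRecOn with
  | nil => rfl
  | append_singleton ks x ih =>
    have hkeys : (pvTbl ks v).keys = PySem.Set.ofList ks := by
      simp only [PySem.Dict.keys, ih, List.map_map]
      rw [show ((fun (x : String × ν) => x.1) ∘ fun q => (q, v q)) = id from rfl, List.map_id]
    rw [pvTbl_append]
    by_cases hx : x ∈ ks
    · have hc : (pvTbl ks v).contains x = true := by
        rw [PySem.Dict.contains_iff_mem_keys, hkeys]
        exact (PySem.Set.mem_ofList ks x).mpr hx
      rw [PySem.Dict.items_insert_of_contains _ _ hc, ih,
          PySem.Set.ofList_append_singleton,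
          PySem.Set.add_of_mem ((PySem.Set.mem_ofList ks x).mpr hx),
          List.map_map]
      refine List.map_congr_left ?_
      intro q hq
      by_cases hqx : q = x
      · subst hqx; simp
      · simp [hqx]
    · have hc : (pvTbl ks v).contains x = false := by
        rw [← Bool.not_eq_true, PySem.Dict.contains_iff_mem_keys, hkeys]
        simp only [PySem.Set.mem_ofList]
        simpa using hx
      rw [PySem.Dict.items_insert_of_not_contains _ _ hc, ih,
          PySem.Set.ofList_append_singleton,
          PySem.Set.add_of_not_mem (by rw [PySem.Set.mem_ofList]; exact hx),
          List.map_append]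
      rfl

theorem pvKeys_tbl {ν : Type} (ks : List String) (v : String → ν) :
    (pvTbl ks v).keys = PySem.Set.ofList ks := by
  simp only [PySem.Dict.keys, pvItems_tbl, List.map_map]
  rw [show ((fun (x : String × ν) => x.1) ∘ fun q => (q, v q)) = id from rfl, List.map_id]

theorem pvContains_tbl {ν : Type} (ks : List String) (v : String → ν) (q : String) :
    (pvTbl ks v).contains q = decide (q ∈ ks) := by
  by_cases h : q ∈ ks
  · simp only [h, decide_true]
    exact (PySem.Dict.contains_iff_mem_keys _ _).mpr (by rw [pvKeys_tbl, PySem.Set.mem_ofList]; exact h)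
  · simp only [h, decide_false]
    rw [← Bool.not_eq_true, PySem.Dict.contains_iff_mem_keys, pvKeys_tbl, PySem.Set.mem_ofList]
    exact h

theorem pvGet?_tbl {ν : Type} (ks : List String) (v : String → ν) (q : String) :
    (pvTbl ks v).get? q = if q ∈ ks then some (v q) else none := by
  by_cases h : q ∈ ks
  · rw [if_pos h]
    refine PySem.Dict.get?_of_mem_items (d := pvTbl ks v) (k := q) (v := v q) ?_ ?_
    · rw [pvItems_tbl]
      exact List.mem_map_of_mem ((PySem.Set.mem_ofList ks q).mpr h)
    · rw [pvKeys_tbl]; exact PySem.Set.nodup_ofList ks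
  · rw [if_neg h]
    rw [PySem.Dict.get?_eq_none_iff_not_mem_keys, pvKeys_tbl, PySem.Set.mem_ofList]
    exact h

theorem pvInsert_tbl {ν : Type} (ks : List String) (v : String → ν) (q : String) (w : ν)
    (h : q ∈ ks) :
    (pvTbl ks v).insert q w = pvTbl ks (fun c => if c = q then w else v c) := by
  apply PySem.Dict.ext
  rw [PySem.Dict.items_insert_of_contains _ _ (by rw [pvContains_tbl]; simpa using h),
      pvItems_tbl, pvItems_tbl, List.map_map]
  refine List.map_congr_left ?_
  intro c hc
  by_cases hcq : c = q
  · subst hcq; simp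
  · simp [hcq]

theorem pvAnnotator_inj (a b : String) (h : "annotator" ++ a = "annotator" ++ b) : a = b := by
  have h2 : ("annotator" ++ a).toList = ("annotator" ++ b).toList := by rw [h]
  simp only [String.toList_append] at h2
  exact String.toList_injective (List.append_cancel_left h2)

theorem pvFoldl_flatMap {α β γ : Type} (l : List α) (f : α → List β) (g : γ → β → γ) (i : γ) :
    (l.flatMap f).foldl g i = l.foldl (fun a x => (f x).foldl g a) i := by
  induction l generalizing i with
  | nil => rfl
  | cons x xs ih => simp [List.flatMap_cons, List.foldl_append, ih]

def pvStep (st : PySem.Dict String (PySem.Dict String (List Bool)) × PySem.Dict String (List Bool))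
    (e : String × String × List Bool) :
    PySem.Dict String (PySem.Dict String (List Bool)) × PySem.Dict String (List Bool) :=
  if 0 < e.2.2.length then
    if e.2.1 == "LLM" then
      (if st.2.contains e.1 then (st.1, st.2.insert e.1 [true]) else st)
    else
      let key := "annotator" ++ e.2.1
      match st.1.get? key with
      | some inner =>
          if inner.contains e.1 then (st.1.insert key (inner.insert e.1 [true]), st.2) else st
      | none => st
  else st

def pvEL (e : String × String × List Bool) (c : String) : Bool :=
  e.1 == c && e.2.1 == "LLM" && decide (0 < e.2.2.length)
def pvEH (e : String × String × List Bool) (q c : String) : Bool :=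
  e.1 == c && ("annotator" ++ e.2.1 == q) && !(e.2.1 == "LLM") && decide (0 < e.2.2.length)
def pvHitL (evs : List (String × String × List Bool)) (c : String) : Bool := evs.any (fun e => pvEL e c)
def pvHitH (evs : List (String × String × List Bool)) (q c : String) : Bool := evs.any (fun e => pvEH e q c)

theorem pvPairCongr (K C : List String) (F1 F2 : String → String → Bool) (G1 G2 : String → Bool)
    (hF : ∀ q ∈ K, ∀ c ∈ C, F1 q c = F2 q c) (hG : ∀ c ∈ C, G1 c = G2 c) :
    (pvTbl K (fun q => pvTbl C (fun c => [F1 q c])), pvTbl C (fun c => [G1 c])) =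
      (pvTbl K (fun q => pvTbl C (fun c => [F2 q c])), pvTbl C (fun c => [G2 c])) := by
  refine congrArg₂ Prod.mk ?_ ?_
  · exact pvTbl_congr _ _ _ (fun q hq => pvTbl_congr _ _ _ (fun c hc => by rw [hF q hq c hc]))
  · exact pvTbl_congr _ _ _ (fun c hc => by rw [hG c hc])

theorem pvMain (K C : List String) (evs : List (String × String × List Bool)) :
    ∀ (f : String → String → Bool) (g : String → Bool),
    evs.foldl pvStep (pvTbl K (fun q => pvTbl C (fun c => [f q c])), pvTbl C (fun c => [g c])) =
      (pvTbl K (fun q => pvTbl C (fun c => [f q c || pvHitH evs q c])),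
       pvTbl C (fun c => [g c || pvHitL evs c])) := by
  induction evs with
  | nil =>
    intro f g
    simp only [List.foldl_nil, pvHitH, pvHitL, List.any_nil, Bool.or_false]
  | cons e rest ih =>
    intro f g
    rw [List.foldl_cons]
    have hcons : ∀ q c, pvHitH (e :: rest) q c = (pvEH e q c || pvHitH rest q c) := by
      intro q c; simp [pvHitH, List.any_cons]
    have hconsL : ∀ c, pvHitL (e :: rest) c = (pvEL e c || pvHitL rest c) := by
      intro c; simp [pvHitL, List.any_cons]
    by_cases hlen : 0 < e.2.2.length
    · by_cases hllm : e.2.1 = "LLM"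
      · -- LLM event
        by_cases hcC : e.1 ∈ C
        · have hstep : pvStep (pvTbl K (fun q => pvTbl C (fun c => [f q c])), pvTbl C (fun c => [g c])) e
              = (pvTbl K (fun q => pvTbl C (fun c => [f q c])), pvTbl C (fun c => [g c || pvEL e c])) := by
            simp only [pvStep, if_pos hlen, hllm, beq_self_eq_true, if_pos, pvContains_tbl,
              decide_eq_true hcC]
            rw [pvInsert_tbl _ _ _ _ hcC]
            refine congrArg _ (pvTbl_congr _ _ _ ?_)
            intro c hc
            by_cases hce : c = e.1
            · subst hce; simp [pvEL, hllm, hlen]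
            · have hb : (e.1 == c) = false := beq_eq_false_iff_ne.mpr (fun h => hce h.symm)
              simp [pvEL, hce, hb]
          rw [hstep, ih f (fun c => g c || pvEL e c)]
          refine pvPairCongr K C _ _ _ _ ?_ ?_
          · intro q hq c hc; rw [hcons]; simp [pvEH, hllm]
          · intro c hc; rw [hconsL, Bool.or_assoc]
        · have hstep : pvStep (pvTbl K (fun q => pvTbl C (fun c => [f q c])), pvTbl C (fun c => [g c])) e
              = (pvTbl K (fun q => pvTbl C (fun c => [f q c])), pvTbl C (fun c => [g c])) := by
            simp [pvStep, hllm, pvContains_tbl, hcC]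
          rw [hstep, ih f g]
          refine pvPairCongr K C _ _ _ _ ?_ ?_
          · intro q hq c hc; rw [hcons]; simp [pvEH, hllm]
          · intro c hc; rw [hconsL]
            have hb : (e.1 == c) = false := beq_eq_false_iff_ne.mpr (fun h => hcC (h ▸ hc))
            simp [pvEL, hb]
      · -- human event
        have hb2 : (e.2.1 == "LLM") = false := beq_eq_false_iff_ne.mpr hllm
        by_cases hk : ("annotator" ++ e.2.1) ∈ K
        · by_cases hcC : e.1 ∈ C
          · have hstep : pvStep (pvTbl K (fun q => pvTbl C (fun c => [f q c])), pvTbl C (fun c => [g c])) e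
                = (pvTbl K (fun q => pvTbl C (fun c => [(f q c || pvEH e q c)])), pvTbl C (fun c => [g c])) := by
              simp only [pvStep, if_pos hlen]
              rw [if_neg (by simp [hb2])]
              simp only [pvGet?_tbl, if_pos hk]
              rw [if_pos (by rw [pvContains_tbl]; exact decide_eq_true hcC)]
              rw [pvInsert_tbl _ _ _ _ hcC, pvInsert_tbl _ _ _ _ hk]
              refine congrArg₂ Prod.mk (pvTbl_congr _ _ _ ?_) rfl
              intro q hq
              by_cases hqk : q = "annotator" ++ e.2.1
              · subst hqk
                rw [if_pos rfl]
                refine pvTbl_congr _ _ _ ?_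
                intro c hc
                by_cases hce : c = e.1
                · subst hce; simp [pvEH, hb2, hlen]
                · have hb : (e.1 == c) = false := beq_eq_false_iff_ne.mpr (fun h => hce h.symm)
                  simp [pvEH, hce, hb]
              · rw [if_neg hqk]
                refine pvTbl_congr _ _ _ ?_
                intro c hc
                have hb3 : ("annotator" ++ e.2.1 == q) = false :=
                  beq_eq_false_iff_ne.mpr (fun h => hqk h.symm)
                simp [pvEH, hb3]
            rw [hstep, ih (fun q c => f q c || pvEH e q c) g]
            refine pvPairCongr K C _ _ _ _ ?_ ?_
            · intro q hq c hc; rw [hcons, Bool.or_assoc]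
            · intro c hc; rw [hconsL]; simp [pvEL, hb2]
          · have hstep : pvStep (pvTbl K (fun q => pvTbl C (fun c => [f q c])), pvTbl C (fun c => [g c])) e
                = (pvTbl K (fun q => pvTbl C (fun c => [f q c])), pvTbl C (fun c => [g c])) := by
              simp only [pvStep, if_pos hlen]
              rw [if_neg (by simp [hb2])]
              simp only [pvGet?_tbl, if_pos hk]
              rw [if_neg (by rw [pvContains_tbl]; simpa using hcC)]
            rw [hstep, ih f g]
            refine pvPairCongr K C _ _ _ _ ?_ ?_
            · intro q hq c hc; rw [hcons]
              have hb : (e.1 == c) = false := beq_eq_false_iff_ne.mpr (fun h => hcC (h ▸ hc))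
              simp [pvEH, hb]
            · intro c hc; rw [hconsL]; simp [pvEL, hb2]
        · have hstep : pvStep (pvTbl K (fun q => pvTbl C (fun c => [f q c])), pvTbl C (fun c => [g c])) e
              = (pvTbl K (fun q => pvTbl C (fun c => [f q c])), pvTbl C (fun c => [g c])) := by
            simp only [pvStep, if_pos hlen]
            rw [if_neg (by simp [hb2])]
            simp only [pvGet?_tbl, if_neg hk]
          rw [hstep, ih f g]
          refine pvPairCongr K C _ _ _ _ ?_ ?_
          · intro q hq c hc; rw [hcons]
            have hb3 : ("annotator" ++ e.2.1 == q) = false :=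
              beq_eq_false_iff_ne.mpr (fun h => hk (h ▸ hq))
            simp [pvEH, hb3]
          · intro c hc; rw [hconsL]; simp [pvEL, hb2]
    · -- empty contribution: no change
      have hstep : pvStep (pvTbl K (fun q => pvTbl C (fun c => [f q c])), pvTbl C (fun c => [g c])) e
          = (pvTbl K (fun q => pvTbl C (fun c => [f q c])), pvTbl C (fun c => [g c])) := by
        simp [pvStep, hlen]
      rw [hstep, ih f g]
      refine pvPairCongr K C _ _ _ _ ?_ ?_
      · intro q hq c hc; rw [hcons]; simp [pvEH, hlen]
      · intro c hc; rw [hconsL]; simp [pvEL, hlen]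

def pvEvents (items : List (String × List (List (String × List (String × List Bool))))) :
    List (String × String × List Bool) :=
  items.flatMap (fun dg => (PySem.List.enumerate dg.2 0).flatMap (fun ig =>
    ((PySem.Dict.mk ig.2).getD "contributions" []).map (fun av => (pvConcept dg.1 ig.1, av))))

theorem pvFoldA (items : List (String × List (List (String × List (String × List Bool)))))
    (init : PySem.Dict String (PySem.Dict String (List Bool)) × PySem.Dict String (List Bool)) :
    items.foldl (fun st1 dg => (PySem.List.enumerate dg.2 0).foldl (fun st2 ig =>
      ((PySem.Dict.mk ig.2).getD "contributions" []).foldl (fun st3 av =>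
        if 0 < av.2.length then
          if av.1 == "LLM" then
            (if st3.2.contains (pvConcept dg.1 ig.1) then (st3.1, st3.2.insert (pvConcept dg.1 ig.1) [true]) else st3)
          else
            match st3.1.get? ("annotator" ++ av.1) with
            | some inner =>
                if inner.contains (pvConcept dg.1 ig.1) then (st3.1.insert ("annotator" ++ av.1) (inner.insert (pvConcept dg.1 ig.1) [true]), st3.2) else st3
            | none => st3
        else st3) st2) st1) init
    = (pvEvents items).foldl pvStep init := by
  unfold pvEvents
  rw [pvFoldl_flatMap]
  simp only [pvFoldl_flatMap, List.foldl_map]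
  rfl

def pvMarks (items : List (String × List (List (String × List (String × List Bool))))) :
    PySem.Set (String × String) :=
  PySem.Set.ofList (items.flatMap (fun dg =>
    (PySem.List.enumerate dg.2 0).flatMap (fun ig =>
      (((PySem.Dict.mk ig.2).getD "contributions" []).filter (fun av => decide (0 < av.2.length))).map
        (fun av => (pvConcept dg.1 ig.1, av.1)))))

theorem pvMarks_human (items : List (String × List (List (String × List (String × List Bool)))))
    (a c : String) (ha : a ≠ "LLM") :
    PySem.Set.contains (pvMarks items) (c, a) = pvHitH (pvEvents items) ("annotator" ++ a) c := by
  rw [Bool.eq_iff_iff, PySem.Set.contains_iff]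
  unfold pvMarks pvEvents pvHitH
  rw [PySem.Set.mem_ofList]
  simp only [List.mem_flatMap, List.mem_map, List.mem_filter, List.any_eq_true, pvEH,
    Bool.and_eq_true, beq_iff_eq,Bool.not_eq_eq_eq_not, Bool.not_true, decide_eq_true_eq]
  constructor
  · rintro ⟨dg, hdg, ig, hig, av, ⟨hav, hlen⟩, heq⟩
    obtain ⟨h1, h2⟩ := Prod.mk.injEq .. ▸ heq
    refine ⟨(pvConcept dg.1 ig.1, av), ⟨dg, hdg, ig, hig, av, hav, rfl⟩,
      ⟨⟨h1, by rw [h2]⟩, by rw [h2]; exact beq_eq_false_iff_ne.mpr ha⟩, hlen⟩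
  · rintro ⟨x, ⟨dg, hdg, ig, hig, av, hav, rfl⟩, ⟨⟨h1, h2⟩, hnl⟩, hlen⟩
    have h3 : av.1 = a := pvAnnotator_inj _ _ h2
    exact ⟨dg, hdg, ig, hig, av, ⟨hav, hlen⟩, by rw [Prod.mk.injEq]; exact ⟨h1, h3⟩⟩

theorem pvMarks_llm (items : List (String × List (List (String × List (String × List Bool)))))
    (c : String) :
    PySem.Set.contains (pvMarks items) (c, "LLM") = pvHitL (pvEvents items) c := by
  rw [Bool.eq_iff_iff, PySem.Set.contains_iff]
  unfold pvMarks pvEvents pvHitL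
  rw [PySem.Set.mem_ofList]
  simp only [List.mem_flatMap, List.mem_map, List.mem_filter, List.any_eq_true, pvEL,
    Bool.and_eq_true, beq_iff_eq, decide_eq_true_eq]
  constructor
  · rintro ⟨dg, hdg, ig, hig, av, ⟨hav, hlen⟩, heq⟩
    obtain ⟨h1, h2⟩ := Prod.mk.injEq .. ▸ heq
    exact ⟨(pvConcept dg.1 ig.1, av), ⟨dg, hdg, ig, hig, av, hav, rfl⟩, ⟨h1, h2⟩, hlen⟩
  · rintro ⟨x, ⟨dg, hdg, ig, hig, av, hav, rfl⟩, ⟨h1, h2⟩, hlen⟩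
    exact ⟨dg, hdg, ig, hig, av, ⟨hav, hlen⟩, by rw [Prod.mk.injEq]; exact ⟨h1, h2⟩⟩

theorem pvAB (m : List (String × List (List (String × List (String × List Bool))))) (anns : List String) :
    create_final_annotation_files m anns = create_final_annotation_files_alt m anns := by
  unfold create_final_annotation_files create_final_annotation_files_alt
  simp only [PySem.List.foldl_append_singleton_eq_map, PySem.List.foldl_append_eq_flatMap,
    List.nil_append]
  rw [pvFoldA]
  rw [show (PySem.Dict.ofList
      (List.map
        (fun a =>
          ("annotator" ++ a,
            PySem.Dict.ofList
              (List.map (fun c => (c, [false]))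
                (List.flatMap (fun x => List.map (pvConcept x.1) (PySem.List.pyRange 0 (x.2.length : Int) 1))
                  (PySem.List.sorted m (fun p => p.1) false)))))
        (PySem.List.sorted (List.filter (fun a => !(a == "LLM")) anns) (fun x => x) false)))
    = pvTbl ((PySem.List.sorted (List.filter (fun a => !(a == "LLM")) anns) (fun x => x) false).map
        (fun a => "annotator" ++ a))
        (fun _ => pvTbl (List.flatMap (fun x => List.map (pvConcept x.1) (PySem.List.pyRange 0 (x.2.length : Int) 1))
                  (PySem.List.sorted m (fun p => p.1) false)) (fun _ => [false]))
    from by unfold pvTbl; rw [List.map_map]; rfl]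
  rw [show (PySem.Dict.ofList
      (List.map (fun c => (c, [false]))
        (List.flatMap (fun x => List.map (pvConcept x.1) (PySem.List.pyRange 0 (x.2.length : Int) 1))
          (PySem.List.sorted m (fun p => p.1) false))))
    = pvTbl (List.flatMap (fun x => List.map (pvConcept x.1) (PySem.List.pyRange 0 (x.2.length : Int) 1))
          (PySem.List.sorted m (fun p => p.1) false)) (fun _ => [false])
    from rfl]
  have hmain := pvMain
    ((PySem.List.sorted (List.filter (fun a => !(a == "LLM")) anns) (fun x => x) false).map
      (fun a => "annotator" ++ a))
    (List.flatMap (fun x => List.map (pvConcept x.1) (PySem.List.pyRange 0 (x.2.length : Int) 1))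
      (PySem.List.sorted m (fun p => p.1) false))
    (pvEvents (PySem.List.sorted m (fun p => p.1) false))
    (fun _ _ => false) (fun _ => false)
  beta_reduce at hmain
  rw [hmain]
  simp only [Bool.false_or]
  have hB1 : (PySem.Dict.ofList
      (List.map
        (fun a =>
          ("annotator" ++ a,
            PySem.Dict.ofList
              (List.map
                (fun c =>
                  (c,
                    [PySem.Set.contains (pvMarks (PySem.List.sorted m (fun p => p.1) false)) (c, a)]))
                (List.flatMap (fun x => List.map (pvConcept x.1) (PySem.List.pyRange 0 (x.2.length : Int) 1))
                  (PySem.List.sorted m (fun p => p.1) false)))))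
        (PySem.List.sorted (List.filter (fun a => !(a == "LLM")) anns) (fun x => x) false)))
    = pvTbl ((PySem.List.sorted (List.filter (fun a => !(a == "LLM")) anns) (fun x => x) false).map
        (fun a => "annotator" ++ a))
        (fun q => pvTbl (List.flatMap (fun x => List.map (pvConcept x.1) (PySem.List.pyRange 0 (x.2.length : Int) 1))
                  (PySem.List.sorted m (fun p => p.1) false))
            (fun c => [pvHitH (pvEvents (PySem.List.sorted m (fun p => p.1) false)) q c])) := by
    unfold pvTbl
    rw [List.map_map]
    refine congrArg _ (List.map_congr_left ?_)
    intro a ha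
    have hne : a ≠ "LLM" := by
      rw [PySem.List.mem_sorted] at ha
      have := (List.mem_filter.mp ha).2
      intro hh; rw [hh] at this; simp at this
    show ("annotator" ++ a,
        PySem.Dict.ofList
          ((List.flatMap (fun x => List.map (pvConcept x.1) (PySem.List.pyRange 0 (x.2.length : Int) 1))
            (PySem.List.sorted m (fun p => p.1) false)).map
            (fun c => (c, [PySem.Set.contains (pvMarks (PySem.List.sorted m (fun p => p.1) false)) (c, a)]))))
      = ("annotator" ++ a,
        PySem.Dict.ofList
          ((List.flatMap (fun x => List.map (pvConcept x.1) (PySem.List.pyRange 0 (x.2.length : Int) 1))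
            (PySem.List.sorted m (fun p => p.1) false)).map
            (fun c => (c, [pvHitH (pvEvents (PySem.List.sorted m (fun p => p.1) false)) ("annotator" ++ a) c]))))
    refine congrArg _ (congrArg _ (List.map_congr_left ?_))
    intro c hc
    rw [pvMarks_human _ _ _ hne]
  have hB2 : (PySem.Dict.ofList
      (List.map
        (fun c =>
          (c, [PySem.Set.contains (pvMarks (PySem.List.sorted m (fun p => p.1) false)) (c, "LLM")]))
        (List.flatMap (fun x => List.map (pvConcept x.1) (PySem.List.pyRange 0 (x.2.length : Int) 1))
          (PySem.List.sorted m (fun p => p.1) false))))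
    = pvTbl (List.flatMap (fun x => List.map (pvConcept x.1) (PySem.List.pyRange 0 (x.2.length : Int) 1))
          (PySem.List.sorted m (fun p => p.1) false))
        (fun c => [pvHitL (pvEvents (PySem.List.sorted m (fun p => p.1) false)) c]) := by
    unfold pvTbl
    refine congrArg _ (List.map_congr_left ?_)
    intro c hc
    rw [pvMarks_llm]
  refine congrArg₂ Prod.mk ?_ ?_
  · exact congrArg (List.map _) (congrArg PySem.Dict.items hB1.symm)
  · exact congrArg PySem.Dict.items hB2.symm

-- ===== VERDICT (by name: the statement is the Claim_ definition above) =====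
theorem create_final_annotation_files_spec : Claim_equal_create_final_annotation_files := by
  intro m anns _ _
  exact pvAB m anns
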